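-- pv_equiv track=rewrite | github.com/Akhileshdhama/Basic-Python-Programs | Search_engine.py | compiled_result
-- ===== SOURCE A (Python) =====
-- def compiled_result(search_item,list):
--     rough_list=searched_item_in_list(search_item,list)
--     search_item=search_item.split()
--
--     final_list=[]
-- # descended order final list
--     for item in search_item:
--         relevance=0
--
--         for word in rough_list:
--             items_in_str=word.split()
--             itr_relevance=items_in_str.count(item)
--             if itr_relevance>=relevance:
--                 relevance=itr_relevance
--         for i in range(len(rough_list)):
--             for word in rough_list:
--                 items_in_str=word.split()
--                 if relevance==items_in_str.count(item) and word not in final_list: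
--                     final_list.append(word)
--             relevance-=1
--     return final_list
--
-- def searched_item_in_list(search_item,list):
--     searched_item_in_list_list=[]
--     search_item=search_item.split()
--
--     for item in search_item:
--
--         for word in list:
--             if item in word and word not in searched_item_in_list_list:
--                 searched_item_in_list_list.append(word)
--     return searched_item_in_list_list
-- ===== SOURCE B (Python) =====
-- def compiled_result(search_item, list):
--     words = search_item.split()
--     matched = []
--     for item in words:
--         for w in list:
--             if item in w and w not in matched:
--                 matched.append(w)
--     n = len(matched)
--     final = []
--     for item in words:
--         # one pass: per-string keyword counts, bucketed by count, and the max count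
--         buckets = {}
--         maxc = 0
--         for w in matched:
--             c = w.split().count(item)
--             buckets[c] = buckets.get(c, []) + [w]
--             maxc = max(maxc, c)
--         for r in range(maxc, maxc - n, -1):
--             for w in buckets.get(r, []):
--                 if w not in final:
--                     final.append(w)
--     return final
-- ===== Notes on version B (the rewrite author's own statement) =====
-- stated objective: alternative
-- what changed: Per keyword, B computes each matched string's word-count once, grouping the strings into a dict of count-buckets (and the max count) in a single pass, then emits buckets over the same descending relevance range - replacing A's nested re-scan that re-splits and re-counts every string at every relevance level.
import Mathlib
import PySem

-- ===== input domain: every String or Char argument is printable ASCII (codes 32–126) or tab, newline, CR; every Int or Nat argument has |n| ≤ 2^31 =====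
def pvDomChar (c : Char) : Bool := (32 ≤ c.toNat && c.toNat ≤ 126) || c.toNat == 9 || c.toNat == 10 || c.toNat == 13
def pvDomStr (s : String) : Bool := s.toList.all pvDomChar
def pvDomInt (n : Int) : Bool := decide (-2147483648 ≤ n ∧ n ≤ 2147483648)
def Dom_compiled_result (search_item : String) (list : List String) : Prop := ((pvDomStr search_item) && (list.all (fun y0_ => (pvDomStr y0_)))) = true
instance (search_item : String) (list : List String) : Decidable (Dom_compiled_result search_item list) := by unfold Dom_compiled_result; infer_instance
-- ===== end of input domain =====

-- B replaces A's per-relevance-level re-scan (which re-splits and re-counts every matched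
-- string at every level) by one pass that buckets matched strings by their precomputed
-- keyword count in a dict, then emits buckets over the same descending relevance range.


-- ===== PORT A =====
def searched_item_in_list (search_item : String) (list : List String) : List String :=
  (PySem.Str.split₀ search_item).foldl (fun acc item =>
    list.foldl (fun acc word =>
      if PySem.Str.isIn item word = true ∧ word ∉ acc then acc ++ [word] else acc) acc) []

def compiled_result (search_item : String) (list : List String) : List String :=
  let rough_list := searched_item_in_list search_item list
  let search_items := PySem.Str.split₀ search_item
  search_items.foldl (fun final_list item =>
    let relevance : Int := rough_list.foldl (fun relevance word =>
      let itr_relevance : Int := ((PySem.Str.split₀ word).count item : Int)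
      if itr_relevance ≥ relevance then itr_relevance else relevance) 0
    ((PySem.List.pyRange 0 (rough_list.length : Int) 1).foldl
      (fun (st : List String × Int) _ =>
        (rough_list.foldl (fun fl word =>
          if st.2 = ((PySem.Str.split₀ word).count item : Int) ∧ word ∉ fl
          then fl ++ [word] else fl) st.1,
         st.2 - 1))
      (final_list, relevance)).1) []

-- ===== PORT B =====
def compiled_result_alt (search_item : String) (list : List String) : List String :=
  let words := PySem.Str.split₀ search_item
  let matched := words.foldl (fun acc item =>
    list.foldl (fun acc w =>
      if PySem.Str.isIn item w = true ∧ w ∉ acc then acc ++ [w] else acc) acc) []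
  let n : Int := (matched.length : Int)
  words.foldl (fun final item =>
    -- one pass: bucket matched strings by their keyword count, tracking the max count
    let bm := matched.foldl (fun (p : PySem.Dict Int (List String) × Int) w =>
      let c : Int := ((PySem.Str.split₀ w).count item : Int)
      (p.1.insert c (p.1.getD c [] ++ [w]), max p.2 c)) (PySem.Dict.empty, 0)
    (PySem.List.pyRange bm.2 (bm.2 - n) (-1)).foldl (fun fl r =>
      (bm.1.getD r []).foldl (fun fl w =>
        if w ∉ fl then fl ++ [w] else fl) fl) final) []

-- ===== PRECONDITION & SPEC =====
def Spec_compiled_result (search_item : String) (list : List String) (out : List String) : Prop := out = compiled_result_alt search_item list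
instance (search_item : String) (list : List String) (out : List String) : Decidable (Spec_compiled_result search_item list out) := by unfold Spec_compiled_result; infer_instance

-- ===== CLAIM (what is proved, stated in full; the proofs are below) =====
def Claim_equal_compiled_result : Prop := ∀ (search_item : String) (list : List String), Dom_compiled_result search_item list → Spec_compiled_result search_item list (compiled_result search_item list)

-- ===== LEMMAS AND PROOFS =====

-- B's one-pass bucket dict at key r holds exactly the matched strings whose count is r, in order.
theorem bucket_getD (item : String) (ws : List String)
    (d : PySem.Dict Int (List String)) (m : Int) (r : Int) :
    ((ws.foldl (fun (p : PySem.Dict Int (List String) × Int) w =>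
        (p.1.insert ((PySem.Str.split₀ w).count item : Int)
          (p.1.getD ((PySem.Str.split₀ w).count item : Int) [] ++ [w]),
         max p.2 ((PySem.Str.split₀ w).count item : Int))) (d, m)).1).getD r []
    = d.getD r [] ++ ws.filter (fun w => decide (((PySem.Str.split₀ w).count item : Int) = r)) := by
  induction ws generalizing d m with
  | nil => simp
  | cons w ws ih =>
    simp only [List.foldl_cons, List.filter_cons]
    rw [ih]
    by_cases h : ((PySem.Str.split₀ w).count item : Int) = r
    · subst h
      simp [PySem.Dict.getD_insert_self]
    · rw [PySem.Dict.getD_insert_of_ne _ _ _ (Ne.symm h)]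
      simp [h]

-- B's one-pass max equals A's relevance fold.
theorem bucket_max (item : String) (ws : List String)
    (d : PySem.Dict Int (List String)) (m : Int) :
    ((ws.foldl (fun (p : PySem.Dict Int (List String) × Int) w =>
        (p.1.insert ((PySem.Str.split₀ w).count item : Int)
          (p.1.getD ((PySem.Str.split₀ w).count item : Int) [] ++ [w]),
         max p.2 ((PySem.Str.split₀ w).count item : Int))) (d, m)).2)
    = ws.foldl (fun relevance w =>
        if ((PySem.Str.split₀ w).count item : Int) ≥ relevance
        then ((PySem.Str.split₀ w).count item : Int) else relevance) m := by
  induction ws generalizing d m with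
  | nil => rfl
  | cons w ws ih =>
    simp only [List.foldl_cons]
    rw [ih, show max m ((PySem.Str.split₀ w).count item : Int)
      = if ((PySem.Str.split₀ w).count item : Int) ≥ m
        then ((PySem.Str.split₀ w).count item : Int) else m by
      by_cases h : ((PySem.Str.split₀ w).count item : Int) ≥ m
      · rw [if_pos h, max_eq_right h]
      · rw [if_neg h, max_eq_left (by omega)]]

-- A's counted-down loop over range(len) equals a loop over range(rel, rel-len, -1).
theorem countdown_fold (item : String) (rough : List String)
    (l : List Int) (rel : Int) (fl : List String) :
    ((l.foldl (fun (st : List String × Int) _ =>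
        (rough.foldl (fun fl word =>
          if st.2 = ((PySem.Str.split₀ word).count item : Int) ∧ word ∉ fl
          then fl ++ [word] else fl) st.1,
         st.2 - 1)) (fl, rel)).1)
    = (PySem.List.pyRange rel (rel - (l.length : Int)) (-1)).foldl (fun fl r =>
        rough.foldl (fun fl word =>
          if r = ((PySem.Str.split₀ word).count item : Int) ∧ word ∉ fl
          then fl ++ [word] else fl) fl) fl := by
  induction l generalizing rel fl with
  | nil => simp [PySem.List.pyRange_neg_one_eq_nil]
  | cons x xs ih =>
    simp only [List.foldl_cons, List.length_cons]
    have hlen : rel - ((xs.length + 1 : Nat) : Int) = (rel - 1) - (xs.length : Int) := by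
      push_cast; ring
    rw [hlen, PySem.List.pyRange_neg_one_cons (show (rel - 1 : Int) - (xs.length : Int) < rel by omega),
      List.foldl_cons]
    exact ih (rel - 1) _

-- emitting a count-r bucket in order equals A's guarded scan of the matched list at level r.
theorem emit_eq (item : String) (ms : List String) (r : Int) (fl : List String) :
    (((PySem.Dict.empty : PySem.Dict Int (List String)).getD r [] ++
        ms.filter (fun w => decide (((PySem.Str.split₀ w).count item : Int) = r))).foldl
      (fun fl w => if w ∉ fl then fl ++ [w] else fl) fl)
    = ms.foldl (fun fl word =>
        if r = ((PySem.Str.split₀ word).count item : Int) ∧ word ∉ fl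
        then fl ++ [word] else fl) fl := by
  rw [show (PySem.Dict.empty : PySem.Dict Int (List String)).getD r [] = [] from by simp,
    List.nil_append, List.foldl_filter]
  congr 1
  funext fl' w
  by_cases hc : ((PySem.Str.split₀ w).count item : Int) = r
  · by_cases hm : w ∈ fl' <;> simp [hc, hm]
  · simp [hc, show ¬ r = ((PySem.Str.split₀ w).count item : Int) from fun h => hc h.symm]

-- ===== VERDICT (by name: the statement is the Claim_ definition above) =====
theorem compiled_result_spec : Claim_equal_compiled_result := by
  intro search_item list _
  show compiled_result search_item list = compiled_result_alt search_item list
  simp only [compiled_result, compiled_result_alt, searched_item_in_list]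
  congr 1
  funext final item
  rw [countdown_fold]
  simp only [bucket_getD, bucket_max, emit_eq, PySem.List.length_pyRange_one]
  norm_num
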